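-- pv_equiv track=rewrite | github.com/aesthete12/GFG_Problems | Medium/Longest subsequence-1/longest-subsequence1.py | longestSubseq
-- ===== SOURCE A (Python) =====
-- from typing import List
--
-- def longestSubseq(n : int, a : List[int]) -> int:
--     dp = [1] * n
--     maxi = 1
--
--     for i in range(1, n):
--         for j in range(0, i):
--             if abs(a[i] - a[j]) == 1 and dp[i] < 1 + dp[j]:
--                 dp[i] = 1 + dp[j]
--
--             maxi = max(maxi, dp[i])
--
--     return maxi
-- ===== SOURCE B (Python) =====
-- from typing import List
--
-- def longestSubseq(n: int, a: List[int]) -> int: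
--     best = {}
--     ans = 1
--     for i in range(n):
--         v = a[i]
--         c = 1 + max(best.get(v - 1, 0), best.get(v + 1, 0))
--         if c > best.get(v, 0):
--             best[v] = c
--         if c > ans:
--             ans = c
--     return ans
-- ===== Notes on version B (the rewrite author's own statement) =====
-- stated objective: faster
-- what changed: Replaces the O(n^2) double loop over all earlier indices with a single pass keeping a dict from value to the best chain length ending at that value, looking up v-1 and v+1 per element; Pre_ excludes n > len(a), where A raises IndexError except in the accidental case n = 1 with a shorter list, on which A returns 1 without reading a while B's single pass raises.
-- outside the precondition, e.g. on longestSubseq(1, []): A returns 1, B raises IndexError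
import Mathlib
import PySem

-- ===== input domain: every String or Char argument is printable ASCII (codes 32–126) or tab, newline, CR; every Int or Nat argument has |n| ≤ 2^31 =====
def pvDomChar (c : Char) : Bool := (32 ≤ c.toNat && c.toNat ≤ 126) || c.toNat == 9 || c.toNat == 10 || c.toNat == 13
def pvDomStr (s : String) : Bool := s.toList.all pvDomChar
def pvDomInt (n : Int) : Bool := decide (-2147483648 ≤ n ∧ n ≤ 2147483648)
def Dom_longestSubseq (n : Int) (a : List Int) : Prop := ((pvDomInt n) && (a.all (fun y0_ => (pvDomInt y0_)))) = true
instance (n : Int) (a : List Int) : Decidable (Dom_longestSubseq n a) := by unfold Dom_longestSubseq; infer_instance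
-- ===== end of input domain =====

-- B replaces A's O(n^2) double loop by one pass with a dict value -> best chain length (lookups at v-1/v+1); measurably faster.

-- ===== PORT A =====
-- A's inner loop body: 'if abs(a[i]-a[j]) == 1 and dp[i] < 1 + dp[j]: dp[i] = 1 + dp[j]; maxi = max(maxi, dp[i])'
def aInner (a : List Int) (i : Int) (t : List Int × Int) (j : Int) : List Int × Int :=
  let dp1 := if |PySem.List.pyGetD a i 0 - PySem.List.pyGetD a j 0| = 1 ∧
                PySem.List.pyGetD t.1 i 0 < 1 + PySem.List.pyGetD t.1 j 0
             then PySem.List.pySetD t.1 i (1 + PySem.List.pyGetD t.1 j 0) else t.1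
  (dp1, max t.2 (PySem.List.pyGetD dp1 i 0))

-- A's outer iteration: 'for j in range(0, i): …'
def aOuter (a : List Int) (s : List Int × Int) (i : Int) : List Int × Int :=
  (PySem.List.pyRange 0 i 1).foldl (aInner a i) s

def longestSubseq (n : Int) (a : List Int) : Int :=
  ((PySem.List.pyRange 1 n 1).foldl (aOuter a) (PySem.List.pyRepeat [1] n, 1)).2

-- ===== PORT B =====
-- B's loop body: lookup best chains at v-1 / v+1, extend, update dict and running answer
def bLoop (a : List Int) (s : PySem.Dict Int Int × Int) (i : Int) : PySem.Dict Int Int × Int :=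
  let v := PySem.List.pyGetD a i 0
  let c := 1 + max (s.1.getD (v - 1) 0) (s.1.getD (v + 1) 0)
  (if c > s.1.getD v 0 then s.1.insert v c else s.1, if c > s.2 then c else s.2)

def longestSubseq_alt (n : Int) (a : List Int) : Int :=
  ((PySem.List.pyRange 0 n 1).foldl (bLoop a) (PySem.Dict.empty, 1)).2

-- ===== PRECONDITION & SPEC =====
-- Pre_ excludes n > len(a): there Python A raises IndexError, except in the accidental corner n = 1 with a
-- shorter list, where A returns 1 without ever reading a while B's single pass raises IndexError.
def Pre_longestSubseq (n : Int) (a : List Int) : Prop := n ≤ (a.length : Int)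
instance (n : Int) (a : List Int) : Decidable (Pre_longestSubseq n a) := by unfold Pre_longestSubseq; infer_instance
def pvWitness_longestSubseq : Int × List Int := (3, [1, 2, 3])

def Spec_longestSubseq (n : Int) (a : List Int) (out : Int) : Prop := out = longestSubseq_alt n a
instance (n : Int) (a : List Int) (out : Int) : Decidable (Spec_longestSubseq n a out) := by unfold Spec_longestSubseq; infer_instance

-- ===== CLAIM (what is proved, stated in full; the proofs are below) =====
def Claim_equal_longestSubseq : Prop := ∀ (n : Int) (a : List Int), Dom_longestSubseq n a → Pre_longestSubseq n a → Spec_longestSubseq n a (longestSubseq n a)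

-- ===== LEMMAS AND PROOFS =====

-- getD through List.set, for an in-range write
theorem getD_set_ite (xs : List Int) (m : Nat) (y : Int) (k : Nat) (h : m < xs.length) :
    (xs.set m y).getD k 0 = if k = m then y else xs.getD k 0 := by
  rcases eq_or_ne k m with rfl | hne
  · simp [List.getD, h]
  · rw [List.getD, List.getD, List.getElem?_set_ne (by omega)]
    simp [hne]

-- the dp value A computes at index m: 1 + (best dp value at an adjacent-valued earlier index), via running maxima
def supm (a dp : List Int) (m : Nat) (u : Int) : Int :=
  (List.range m).foldl (fun acc k => if a.getD k 0 = u then max acc (dp.getD k 0) else acc) 0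

def supq (a dp : List Int) (m : Nat) (v : Int) : Int :=
  (List.range m).foldl (fun acc k => if |v - a.getD k 0| = 1 then max acc (dp.getD k 0) else acc) 0

theorem supm_succ (a dp : List Int) (m : Nat) (u : Int) :
    supm a dp (m + 1) u = if a.getD m 0 = u then max (supm a dp m u) (dp.getD m 0) else supm a dp m u := by
  simp [supm, List.range_succ]

theorem supq_succ (a dp : List Int) (m : Nat) (v : Int) :
    supq a dp (m + 1) v = if |v - a.getD m 0| = 1 then max (supq a dp m v) (dp.getD m 0) else supq a dp m v := by
  simp [supq, List.range_succ]

theorem supq_nonneg (a dp : List Int) (m : Nat) (v : Int) : 0 ≤ supq a dp m v := by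
  induction m with
  | zero => simp [supq]
  | succ m ih => rw [supq_succ]; split_ifs <;> omega

theorem supm_congr (a dp dp' : List Int) (m : Nat) (u : Int)
    (h : ∀ k, k < m → dp'.getD k 0 = dp.getD k 0) : supm a dp' m u = supm a dp m u := by
  induction m with
  | zero => simp [supm]
  | succ m ih =>
    rw [supm_succ, supm_succ, ih (fun k hk => h k (by omega)), h m (by omega)]

theorem supq_eq_max_supm (a dp : List Int) (m : Nat) (v : Int) :
    supq a dp m v = max (supm a dp m (v - 1)) (supm a dp m (v + 1)) := by
  induction m with
  | zero => simp [supq, supm]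
  | succ m ih =>
    rw [supq_succ, supm_succ, supm_succ]
    have habs : |v - a.getD m 0| = 1 ↔ a.getD m 0 = v - 1 ∨ a.getD m 0 = v + 1 := by
      rw [abs_eq (by norm_num)]; omega
    by_cases hq : |v - a.getD m 0| = 1
    · rcases habs.mp hq with h1 | h1
      · rw [if_pos hq, if_pos h1, if_neg (by omega : ¬ a.getD m 0 = v + 1), ih]; omega
      · rw [if_pos hq, if_neg (by omega : ¬ a.getD m 0 = v - 1), if_pos h1, ih]; omega
    · rw [if_neg hq, if_neg (fun h => hq (habs.mpr (Or.inl h))),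
        if_neg (fun h => hq (habs.mpr (Or.inr h))), ih]

-- Nat-index form of A's inner loop body (aInner at cast indices)
def innerStepN (a : List Int) (m : Nat) (t : List Int × Int) (j : Nat) : List Int × Int :=
  let dp1 := if |a.getD m 0 - a.getD j 0| = 1 ∧ t.1.getD m 0 < 1 + t.1.getD j 0
             then t.1.set m (1 + t.1.getD j 0) else t.1
  (dp1, max t.2 (dp1.getD m 0))

def outerStepN (a : List Int) (s : List Int × Int) (m : Nat) : List Int × Int :=
  (List.range m).foldl (innerStepN a m) s

-- Nat-index form of B's loop body
def bStepN (a : List Int) (s : PySem.Dict Int Int × Int) (k : Nat) : PySem.Dict Int Int × Int :=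
  let v := a.getD k 0
  let c := 1 + max (s.1.getD (v - 1) 0) (s.1.getD (v + 1) 0)
  (if c > s.1.getD v 0 then s.1.insert v c else s.1, if c > s.2 then c else s.2)

-- A's state after outer iterations i = 1 .. m-1
def TA (a : List Int) (N : Nat) : Nat → List Int × Int
  | 0 => (List.replicate N 1, 1)
  | m + 1 => if m = 0 then (List.replicate N 1, 1) else outerStepN a (TA a N m) m

-- B's state after iterations i = 0 .. m-1
def TB (a : List Int) : Nat → PySem.Dict Int Int × Int
  | 0 => (PySem.Dict.empty, 1)
  | m + 1 => bStepN a (TB a m) m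

theorem aInner_cast (a : List Int) (m j : Nat) (t : List Int × Int) :
    aInner a (m : Int) t (j : Int) = innerStepN a m t j := by
  simp [aInner, innerStepN]

theorem aOuter_cast (a : List Int) (m : Nat) (s : List Int × Int) :
    aOuter a s (m : Int) = outerStepN a s m := by
  rw [aOuter, outerStepN, PySem.List.pyRange_zero_natCast, List.foldl_map]
  have he : (fun (t : List Int × Int) (k : Nat) => aInner a (m : Int) t (k : Int)) = innerStepN a m :=
    funext fun t => funext fun k => aInner_cast a m k t
  rw [he]

theorem bLoop_cast (a : List Int) (k : Nat) (s : PySem.Dict Int Int × Int) :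
    bLoop a s (k : Int) = bStepN a s k := by
  simp [bLoop, bStepN]

-- inner-loop invariant: the partial inner fold keeps dp unchanged except at m, where it holds 1 + (running max)
theorem innerFold_spec (a : List Int) (N m : Nat) (dp : List Int) (maxi : Int)
    (hlen : dp.length = N) (hm : m < N) (hdpm : dp.getD m 0 = 1) :
    ∀ t, t ≤ m →
      ((List.range t).foldl (innerStepN a m) (dp, maxi)).1.length = N ∧
      (∀ k, ((List.range t).foldl (innerStepN a m) (dp, maxi)).1.getD k 0 =
          if k = m then 1 + supq a dp t (a.getD m 0) else dp.getD k 0) ∧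
      ((List.range t).foldl (innerStepN a m) (dp, maxi)).2 =
          if t = 0 then maxi else max maxi (1 + supq a dp t (a.getD m 0)) := by
  intro t
  induction t with
  | zero =>
    intro _
    refine ⟨by simpa using hlen, ?_, by simp⟩
    intro k
    have h0 : supq a dp 0 (a.getD m 0) = 0 := by simp [supq]
    rcases eq_or_ne k m with rfl | hk
    · show dp.getD k 0 = if k = k then 1 + supq a dp 0 (a.getD k 0) else dp.getD k 0
      rw [if_pos rfl, h0, hdpm]
      omega
    · show dp.getD k 0 = if k = m then 1 + supq a dp 0 (a.getD m 0) else dp.getD k 0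
      rw [if_neg hk]
  | succ t ih =>
    intro ht
    obtain ⟨L, G, M⟩ := ih (by omega)
    rw [List.range_succ, List.foldl_append, List.foldl_cons, List.foldl_nil]
    set St := (List.range t).foldl (innerStepN a m) (dp, maxi) with hSt
    have htm : t ≠ m := by omega
    have hGt : St.1.getD t 0 = dp.getD t 0 := by rw [G t]; simp [htm]
    have hGm : St.1.getD m 0 = 1 + supq a dp t (a.getD m 0) := by rw [G m]; simp
    by_cases hc : |a.getD m 0 - a.getD t 0| = 1 ∧ St.1.getD m 0 < 1 + St.1.getD t 0
    · have hs : supq a dp (t + 1) (a.getD m 0) = dp.getD t 0 := by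
        rw [supq_succ, if_pos hc.1]
        have := hc.2
        rw [hGm, hGt] at this
        omega
      simp only [innerStepN]
      rw [if_pos hc]
      refine ⟨by simpa using L, ?_, ?_⟩
      · intro k
        rw [getD_set_ite _ _ _ _ (by omega : m < St.1.length)]
        rcases eq_or_ne k m with rfl | hk
        · rw [if_pos rfl, if_pos rfl, hs, hGt]
        · rw [if_neg hk, if_neg hk, G k, if_neg hk]
      · rw [getD_set_ite _ _ _ _ (by omega : m < St.1.length), if_pos rfl, M, hGt, hs]
        rcases Nat.eq_zero_or_pos t with rfl | ht0
        · simp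
        · rw [if_neg (by omega), if_neg (by omega)]
          have h2 : supq a dp t (a.getD m 0) ≤ dp.getD t 0 := by
            have := hc.2; rw [hGm, hGt] at this; omega
          omega
    · have hs : supq a dp (t + 1) (a.getD m 0) = supq a dp t (a.getD m 0) := by
        rw [supq_succ]
        split_ifs with h
        · have hnlt : ¬ St.1.getD m 0 < 1 + St.1.getD t 0 := fun hlt => hc ⟨h, hlt⟩
          rw [hGm, hGt] at hnlt
          omega
        · rfl
      simp only [innerStepN]
      rw [if_neg hc]
      refine ⟨L, ?_, ?_⟩
      · intro k
        rw [G k, hs]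
      · rw [M, hGm, hs]
        rcases Nat.eq_zero_or_pos t with rfl | ht0
        · simp
        · rw [if_neg (by omega), if_neg (by omega)]
          omega

theorem outerStepN_spec (a : List Int) (N m : Nat) (dp : List Int) (maxi : Int)
    (hlen : dp.length = N) (hm : m < N) (hdpm : dp.getD m 0 = 1) :
    (outerStepN a (dp, maxi) m).1.length = N ∧
    (∀ k, (outerStepN a (dp, maxi) m).1.getD k 0 =
        if k = m then 1 + supq a dp m (a.getD m 0) else dp.getD k 0) ∧
    (outerStepN a (dp, maxi) m).2 = if m = 0 then maxi else max maxi (1 + supq a dp m (a.getD m 0)) :=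
  innerFold_spec a N m dp maxi hlen hm hdpm m le_rfl

-- the main invariant coupling A's (dp, maxi) with B's (dict, ans)
theorem main_inv (a : List Int) (N : Nat) (m : Nat) (h1 : 1 ≤ m) (hm : m ≤ N) :
    (TA a N m).1.length = N ∧
    (∀ k, m ≤ k → k < N → (TA a N m).1.getD k 0 = 1) ∧
    (∀ k, k < N → 1 ≤ (TA a N m).1.getD k 0) ∧
    (∀ u, (TB a m).1.getD u 0 = supm a (TA a N m).1 m u) ∧
    (TA a N m).2 = (TB a m).2 := by
  revert hm
  induction m, h1 using Nat.le_induction with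
  | base =>
    intro hm
    have hTA : TA a N 1 = (List.replicate N 1, 1) := by simp [TA]
    have hTB : TB a 1 = ((PySem.Dict.empty).insert (a.getD 0 0) 1, 1) := by
      simp [TB, bStepN, PySem.Dict.getD_empty]
    have hrep : ∀ k, k < N → (List.replicate N (1 : Int)).getD k 0 = 1 := by
      intro k hk
      rw [List.getD, List.getElem?_replicate, if_pos hk]
      rfl
    rw [hTA, hTB]
    refine ⟨by simp, fun k _ hk => hrep k hk, fun k hk => by rw [hrep k hk], ?_, rfl⟩
    intro u
    rw [PySem.Dict.getD_insert]
    have : supm a (List.replicate N 1) 1 u =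
        if a.getD 0 0 = u then max (supm a (List.replicate N 1) 0 u) ((List.replicate N (1:Int)).getD 0 0) else supm a (List.replicate N 1) 0 u := supm_succ ..
    rw [this, hrep 0 (by omega)]
    have h0 : supm a (List.replicate N 1) 0 u = 0 := by simp [supm]
    rw [h0]
    rcases eq_or_ne u (a.getD 0 0) with rfl | hne
    · rw [if_pos rfl, if_pos rfl]; omega
    · rw [if_neg hne, if_neg (fun h => hne h.symm)]; simp [PySem.Dict.getD_empty]
  | succ m h1m ih =>
    intro hm
    obtain ⟨L, U3, P, D, E⟩ := ih (by omega)
    have hTA1 : TA a N (m + 1) = outerStepN a (TA a N m) m := by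
      simp only [TA]
      rw [if_neg (by omega : ¬ m = 0)]
    have hTB1 : TB a (m + 1) = bStepN a (TB a m) m := by simp [TB]
    have hdpm : (TA a N m).1.getD m 0 = 1 := U3 m le_rfl (by omega)
    have hspec := outerStepN_spec a N m (TA a N m).1 (TA a N m).2 L (by omega) hdpm
    rw [Prod.mk.eta] at hspec
    obtain ⟨L', G', M'⟩ := hspec
    have hcB : (1 : Int) + max ((TB a m).1.getD (a.getD m 0 - 1) 0) ((TB a m).1.getD (a.getD m 0 + 1) 0)
        = 1 + supq a (TA a N m).1 m (a.getD m 0) := by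
      rw [D, D, ← supq_eq_max_supm]
    have hB1 : (TB a (m + 1)).1 = (if 1 + supq a (TA a N m).1 m (a.getD m 0) > (TB a m).1.getD (a.getD m 0) 0
        then (TB a m).1.insert (a.getD m 0) (1 + supq a (TA a N m).1 m (a.getD m 0)) else (TB a m).1) := by
      rw [hTB1]
      simp only [bStepN]
      rw [hcB]
    have hB2 : (TB a (m + 1)).2 = (if 1 + supq a (TA a N m).1 m (a.getD m 0) > (TB a m).2
        then 1 + supq a (TA a N m).1 m (a.getD m 0) else (TB a m).2) := by
      rw [hTB1]
      simp only [bStepN]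
      rw [hcB]
    have hS0 : 0 ≤ supq a (TA a N m).1 m (a.getD m 0) := supq_nonneg ..
    refine ⟨by rw [hTA1]; exact L', ?_, ?_, ?_, ?_⟩
    · intro k hk1 hk2
      rw [hTA1, G' k, if_neg (by omega : k ≠ m)]
      exact U3 k (by omega) hk2
    · intro k hk
      rw [hTA1, G' k]
      rcases eq_or_ne k m with rfl | hne
      · rw [if_pos rfl]; omega
      · rw [if_neg hne]; exact P k hk
    · intro u
      rw [hTA1, hB1]
      have hcongr : supm a (outerStepN a (TA a N m) m).1 m u = supm a (TA a N m).1 m u :=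
        supm_congr _ _ _ _ _ (fun k hk => by rw [G' k, if_neg (by omega : k ≠ m)])
      rw [supm_succ]
      have hvm : (outerStepN a (TA a N m) m).1.getD m 0 = 1 + supq a (TA a N m).1 m (a.getD m 0) := by
        rw [G' m, if_pos rfl]
      rw [hcongr, hvm]
      rcases eq_or_ne u (a.getD m 0) with rfl | hne
      · rw [if_pos rfl]
        by_cases hgt : 1 + supq a (TA a N m).1 m (a.getD m 0) > (TB a m).1.getD (a.getD m 0) 0
        · rw [if_pos hgt, PySem.Dict.getD_insert, if_pos rfl]
          have := D (a.getD m 0)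
          omega
        · rw [if_neg hgt, D]
          have := D (a.getD m 0)
          omega
      · rw [if_neg (show ¬ a.getD m 0 = u from fun h => hne h.symm)]
        by_cases hgt : 1 + supq a (TA a N m).1 m (a.getD m 0) > (TB a m).1.getD (a.getD m 0) 0
        · rw [if_pos hgt, PySem.Dict.getD_insert, if_neg hne, D]
        · rw [if_neg hgt, D]
    · rw [hTA1, M', if_neg (by omega : ¬ m = 0), hB2, ← E]
      omega

theorem bridgeB (a : List Int) (N : Nat) :
    (PySem.List.pyRange 0 (N : Int) 1).foldl (bLoop a) (PySem.Dict.empty, 1) = TB a N := by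
  rw [PySem.List.pyRange_zero_natCast, List.foldl_map]
  have he : (fun (s : PySem.Dict Int Int × Int) (k : Nat) => bLoop a s (k : Int)) = bStepN a :=
    funext fun s => funext fun k => bLoop_cast a k s
  rw [he]
  induction N with
  | zero => simp [TB]
  | succ n ih => rw [List.range_succ, List.foldl_append, ih]; simp [TB]

theorem bridgeA (a : List Int) (N : Nat) (m : Nat) (h1 : 1 ≤ m) :
    (PySem.List.pyRange 1 (m : Int) 1).foldl (aOuter a) (List.replicate N 1, 1) = TA a N m := by
  induction m with
  | zero => omega
  | succ m ih =>
    rcases Nat.eq_or_lt_of_le h1 with h | h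
    · have hm0 : m = 0 := by omega
      subst hm0
      simp [PySem.List.pyRange_one_eq_nil, TA]
    · have hm1 : 1 ≤ m := by omega
      have hc : ((m + 1 : Nat) : Int) = (m : Int) + 1 := by push_cast; ring
      rw [hc, PySem.List.pyRange_one_succ_right (by exact_mod_cast hm1), List.foldl_append]
      simp only [List.foldl_cons, List.foldl_nil]
      rw [ih hm1, aOuter_cast]
      simp only [TA]
      rw [if_neg (by omega : ¬ m = 0)]

-- ===== VERDICT (by name: the statement is the Claim_ definition above) =====
theorem longestSubseq_spec : Claim_equal_longestSubseq := by
  intro n a _ _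
  unfold Spec_longestSubseq
  by_cases hn : n ≤ 0
  · simp [longestSubseq, longestSubseq_alt,
      PySem.List.pyRange_one_eq_nil (by omega : n ≤ 1),
      PySem.List.pyRange_one_eq_nil (by omega : n ≤ 0)]
  · replace hn : 0 < n := by omega
    have hN : n = ((n.toNat : Nat) : Int) := by omega
    have h1 : 1 ≤ n.toNat := by omega
    rw [hN, longestSubseq, longestSubseq_alt, PySem.List.pyRepeat_singleton]
    rw [bridgeB a n.toNat]
    simp only [Int.toNat_natCast]
    rw [bridgeA a n.toNat n.toNat h1]
    exact (main_inv a n.toNat n.toNat h1 le_rfl).2.2.2.2
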